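-- pv_equiv track=rewrite | github.com/Bublays/Security_feed | scripts/generate_html.py | render_stat_cards
-- ===== SOURCE A (Python) =====
-- def render_stat_cards(items: list[dict]) -> str:
--     counts = {"CRITICAL": 0, "HIGH": 0, "MEDIUM": 0, "LOW": 0}
--     for item in items:
--         s = item.get("severity", "UNKNOWN")
--         if s in counts:
--             counts[s] += 1
--     cards = ""
--     for sev, count in counts.items():
--         cards += (
--             f'<div class="sc sc-{sev.lower()}">'
--             f'<div class="sc-n">{count}</div>'
--             f'<div class="sc-l">{sev}</div>'
--             f'</div>'
--         )
--     return cards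
-- ===== SOURCE B (Python) =====
-- SEVERITIES = ("CRITICAL", "HIGH", "MEDIUM", "LOW")
--
--
-- def render_stat_cards(items: list[dict]) -> str:
--     return "".join(
--         f'<div class="sc sc-{sev.lower()}">'
--         f'<div class="sc-n">{sum(1 for it in items if it.get("severity", "UNKNOWN") == sev)}</div>'
--         f'<div class="sc-l">{sev}</div>'
--         f'</div>'
--         for sev in SEVERITIES
--     )
-- ===== Notes on version B (the rewrite author's own statement) =====
-- stated objective: alternative
-- what changed: Replaced the dict-accumulating counting pass plus a second card-building loop with a single ''.join over the fixed severity tuple, counting each severity directly with sum(1 for ...); no mutable dict or string accumulator.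
import Mathlib
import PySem

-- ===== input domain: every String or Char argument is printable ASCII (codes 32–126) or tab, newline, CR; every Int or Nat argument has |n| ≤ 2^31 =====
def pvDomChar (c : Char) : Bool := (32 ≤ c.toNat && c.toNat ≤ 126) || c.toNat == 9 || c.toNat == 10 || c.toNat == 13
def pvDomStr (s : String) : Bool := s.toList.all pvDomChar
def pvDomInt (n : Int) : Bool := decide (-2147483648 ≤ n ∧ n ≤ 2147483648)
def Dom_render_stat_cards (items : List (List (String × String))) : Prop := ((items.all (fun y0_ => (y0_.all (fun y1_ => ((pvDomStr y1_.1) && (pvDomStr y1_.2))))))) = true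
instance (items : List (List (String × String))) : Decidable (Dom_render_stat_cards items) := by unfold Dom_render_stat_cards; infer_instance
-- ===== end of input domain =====

-- B replaces A's dict-accumulating pass + second card loop by one join over the fixed
-- severity tuple with a direct per-severity count (alternative decomposition, same cost class).

-- ===== PORT A =====
-- item.get("severity", "UNKNOWN")
def pvSev (item : List (String × String)) : String :=
  (PySem.Dict.mk item).getD "severity" "UNKNOWN"

-- one iteration of A's counting loop
def pvStepA (counts : PySem.Dict String Int) (item : List (String × String)) : PySem.Dict String Int :=
  let s := pvSev item
  if counts.contains s then counts.insert s (counts.getD s 0 + 1) else counts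

-- the f-string of A's second loop (also the f-string of B's generator)
def pvCard (sev : String) (count : Int) : String :=
  "<div class=\"sc sc-" ++ PySem.Str.lower sev ++ "\">" ++
  "<div class=\"sc-n\">" ++ PySem.Int.toStr count ++ "</div>" ++
  "<div class=\"sc-l\">" ++ sev ++ "</div>" ++ "</div>"

def render_stat_cards (items : List (List (String × String))) : String :=
  let counts := items.foldl pvStepA
    (PySem.Dict.ofList [("CRITICAL", 0), ("HIGH", 0), ("MEDIUM", 0), ("LOW", 0)])
  counts.items.foldl (fun cards p => cards ++ pvCard p.1 p.2) ""

-- ===== PORT B =====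
-- sum(1 for it in items if it.get("severity", "UNKNOWN") == sev)
def pvCountB (items : List (List (String × String))) (sev : String) : Int :=
  (items.countP (fun it => pvSev it == sev) : Int)

def render_stat_cards_alt (items : List (List (String × String))) : String :=
  PySem.Str.join ""
    (["CRITICAL", "HIGH", "MEDIUM", "LOW"].map (fun sev => pvCard sev (pvCountB items sev)))

-- ===== PRECONDITION & SPEC =====
def Spec_render_stat_cards (items : List (List (String × String))) (out : String) : Prop := out = render_stat_cards_alt items
instance (items : List (List (String × String))) (out : String) : Decidable (Spec_render_stat_cards items out) := by unfold Spec_render_stat_cards; infer_instance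

-- ===== CLAIM (what is proved, stated in full; the proofs are below) =====
def Claim_equal_render_stat_cards : Prop := ∀ (items : List (List (String × String))), Dom_render_stat_cards items → Spec_render_stat_cards items (render_stat_cards items)

-- ===== LEMMAS AND PROOFS =====

-- A's counting loop, run on the literal four-key dict, produces exactly B's per-severity counts.
theorem foldl_stepA (items : List (List (String × String))) (a b c d : Int) :
    items.foldl pvStepA (PySem.Dict.mk [("CRITICAL", a), ("HIGH", b), ("MEDIUM", c), ("LOW", d)])
      = PySem.Dict.mk [("CRITICAL", a + pvCountB items "CRITICAL"),
                       ("HIGH", b + pvCountB items "HIGH"),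
                       ("MEDIUM", c + pvCountB items "MEDIUM"),
                       ("LOW", d + pvCountB items "LOW")] := by
  induction items generalizing a b c d with
  | nil => simp [pvCountB]
  | cons it rest ih =>
    have hstep : ∀ x y z w : Int,
        pvStepA (PySem.Dict.mk [("CRITICAL", x), ("HIGH", y), ("MEDIUM", z), ("LOW", w)]) it
          = if pvSev it = "CRITICAL" then
              PySem.Dict.mk [("CRITICAL", x + 1), ("HIGH", y), ("MEDIUM", z), ("LOW", w)]
            else if pvSev it = "HIGH" then
              PySem.Dict.mk [("CRITICAL", x), ("HIGH", y + 1), ("MEDIUM", z), ("LOW", w)]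
            else if pvSev it = "MEDIUM" then
              PySem.Dict.mk [("CRITICAL", x), ("HIGH", y), ("MEDIUM", z + 1), ("LOW", w)]
            else if pvSev it = "LOW" then
              PySem.Dict.mk [("CRITICAL", x), ("HIGH", y), ("MEDIUM", z), ("LOW", w + 1)]
            else PySem.Dict.mk [("CRITICAL", x), ("HIGH", y), ("MEDIUM", z), ("LOW", w)] := by
      intro x y z w
      unfold pvStepA
      generalize pvSev it = s
      by_cases h1 : s = "CRITICAL"
      · subst h1
        simp [PySem.Dict.contains, PySem.Dict.insert, PySem.Dict.getD, PySem.Dict.get?]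
      by_cases h2 : s = "HIGH"
      · subst h2
        simp [PySem.Dict.contains, PySem.Dict.insert, PySem.Dict.getD, PySem.Dict.get?]
      by_cases h3 : s = "MEDIUM"
      · subst h3
        simp [PySem.Dict.contains, PySem.Dict.insert, PySem.Dict.getD, PySem.Dict.get?]
      by_cases h4 : s = "LOW"
      · subst h4
        simp [PySem.Dict.contains, PySem.Dict.insert, PySem.Dict.getD, PySem.Dict.get?]
      · have e1 : ("CRITICAL" == s) = false := beq_eq_false_iff_ne.mpr (fun h => h1 h.symm)
        have e2 : ("HIGH" == s) = false := beq_eq_false_iff_ne.mpr (fun h => h2 h.symm)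
        have e3 : ("MEDIUM" == s) = false := beq_eq_false_iff_ne.mpr (fun h => h3 h.symm)
        have e4 : ("LOW" == s) = false := beq_eq_false_iff_ne.mpr (fun h => h4 h.symm)
        simp [PySem.Dict.contains, e1, e2, e3, e4, h1, h2, h3, h4]
    have hcnt : ∀ sev : String,
        pvCountB (it :: rest) sev
          = (if pvSev it = sev then 1 else 0) + pvCountB rest sev := by
      intro sev
      simp [pvCountB, List.countP_cons]
      by_cases h : pvSev it = sev <;> simp [h] <;> omega
    rw [List.foldl_cons, hstep]
    by_cases h1 : pvSev it = "CRITICAL" <;>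
      by_cases h2 : pvSev it = "HIGH" <;>
        by_cases h3 : pvSev it = "MEDIUM" <;>
          by_cases h4 : pvSev it = "LOW" <;>
            simp_all <;> ring

-- ''.join of four strings is the left-nested ++ that A's accumulating loop builds.
theorem join_four (w x y z : String) :
    PySem.Str.join "" [w, x, y, z] = ((("" ++ w) ++ x) ++ y) ++ z := by
  apply String.toList_inj.mp
  simp [PySem.Str.join, PySem.Chars.join, List.intercalate, String.toList_append]

-- ===== VERDICT (by name: the statement is the Claim_ definition above) =====
theorem render_stat_cards_spec : Claim_equal_render_stat_cards := by
  intro items _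
  unfold Spec_render_stat_cards render_stat_cards render_stat_cards_alt
  have hinit : PySem.Dict.ofList ([("CRITICAL", 0), ("HIGH", 0), ("MEDIUM", 0), ("LOW", 0)] : List (String × Int))
      = PySem.Dict.mk [("CRITICAL", 0), ("HIGH", 0), ("MEDIUM", 0), ("LOW", 0)] := by decide
  rw [hinit, foldl_stepA]
  simp [List.foldl, List.map, join_four]
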